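-- pv_equiv track=rewrite | github.com/matanhaz/javadiff | javadiff/SourceFile.py | get_hunks_count
-- ===== SOURCE A (Python) =====
-- def get_hunks_count(indices):
--     if len(indices) == 0:
--         return 0
--     elif len(indices) == 1:
--         return 1
--     hunks = 1
--     s = sorted(indices)
--     for i,j in zip(s, s[1:]):
--         if i + 1 != j:
--             hunks += 1
--     return hunks
-- ===== SOURCE B (Python) =====
-- def get_hunks_count(indices):
--     if not indices:
--         return 0
--     present = set(indices)
--     return len(indices) - sum(1 for v in present if v + 1 in present)
-- ===== Notes on version B (the rewrite author's own statement) =====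
-- stated objective: alternative
-- what changed: B replaces A's sort-then-scan over adjacent pairs by a hash set: hunks = len(indices) - number of distinct values v with v+1 also present (duplicates counted as separate hunks exactly as A counts them).
import Mathlib
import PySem

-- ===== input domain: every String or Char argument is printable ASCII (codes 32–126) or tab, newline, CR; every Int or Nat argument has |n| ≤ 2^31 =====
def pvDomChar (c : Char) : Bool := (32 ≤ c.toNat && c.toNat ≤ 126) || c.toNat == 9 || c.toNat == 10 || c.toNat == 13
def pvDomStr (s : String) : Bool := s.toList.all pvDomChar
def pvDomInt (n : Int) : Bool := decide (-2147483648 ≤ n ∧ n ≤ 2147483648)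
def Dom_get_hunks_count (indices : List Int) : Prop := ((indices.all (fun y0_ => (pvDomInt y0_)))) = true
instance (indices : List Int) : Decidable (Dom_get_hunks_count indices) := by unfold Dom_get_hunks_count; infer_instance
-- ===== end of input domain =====

-- B counts hunks without sorting: a set of the values, then hunks = len - #{distinct v with v+1 present}; an alternative set-based algorithm.


-- ===== PORT A =====
def get_hunks_count (indices : List Int) : Int :=
  if indices.length = 0 then 0
  else if indices.length = 1 then 1
  else
    let s := PySem.List.sorted indices (fun x => x) false
    (s.zip (PySem.List.slice s (some 1) none)).foldl
      (fun hunks p => if p.1 + 1 ≠ p.2 then hunks + 1 else hunks) 1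

-- ===== PORT B =====
def get_hunks_count_alt (indices : List Int) : Int :=
  if indices = [] then 0
  else
    let present := PySem.Set.ofList indices
    (indices.length : Int)
      - ((present.filter (fun v => PySem.Set.contains present (v + 1))).length : Int)

-- ===== PRECONDITION & SPEC =====
def Spec_get_hunks_count (indices : List Int) (out : Int) : Prop := out = get_hunks_count_alt indices
instance (indices : List Int) (out : Int) : Decidable (Spec_get_hunks_count indices out) := by unfold Spec_get_hunks_count; infer_instance

-- ===== CLAIM (what is proved, stated in full; the proofs are below) =====
def Claim_equal_get_hunks_count : Prop := ∀ (indices : List Int), Dom_get_hunks_count indices → Spec_get_hunks_count indices (get_hunks_count indices)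

-- ===== LEMMAS AND PROOFS =====

-- The set of values v of the list with v+1 also present (its card is what B subtracts).
def succSet (l : List Int) : Finset Int := l.toFinset.filter (fun v => v + 1 ∈ l.toFinset)

-- A's loop counts pairs: foldl is init + count of pairs with p.1+1 ≠ p.2.
lemma foldl_hunks (l : List (Int × Int)) (a : Int) :
    l.foldl (fun hunks p => if p.1 + 1 ≠ p.2 then hunks + 1 else hunks) a
      = a + (l.countP (fun p => decide (p.1 + 1 ≠ p.2)) : Int) := by
  simpa using PySem.List.foldl_count_if (fun p : Int × Int => decide (p.1 + 1 ≠ p.2)) l a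

lemma countP_not_add (l : List (Int × Int)) (p : Int × Int → Bool) :
    l.countP p + l.countP (fun x => !(p x)) = l.length := by
  induction l with
  | nil => simp
  | cons a t ih => by_cases h : p a <;> simp [h] <;> omega

-- Core: on a sorted (≤) list, the number of adjacent pairs differing by exactly 1
-- equals the number of distinct values v with v+1 present.
lemma adj_eq_succSet (s : List Int) (hs : s.Pairwise (· ≤ ·)) :
    ((s.zip s.tail).countP (fun p => decide (p.1 + 1 = p.2)) : Int) = (succSet s).card := by
  induction s with
  | nil => simp [succSet]
  | cons a t ih =>
    cases t with
    | nil =>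
      simp [succSet, Finset.filter_singleton]
    | cons b t' =>
      rw [List.pairwise_cons] at hs
      obtain ⟨hale, hst⟩ := hs
      have hab : a ≤ b := hale b (by simp)
      have hble : ∀ x ∈ (b :: t').toFinset, b ≤ x := by
        intro x hx
        simp only [List.mem_toFinset, List.mem_cons] at hx
        rcases hx with rfl | hx
        · exact le_refl _
        · exact (List.pairwise_cons.mp hst).1 x hx
      have ihv := ih hst
      simp only [succSet] at ihv
      by_cases heq : a = b
      · subst heq
        have hfs : (a :: a :: t').toFinset = (a :: t').toFinset := by
          simp [List.toFinset_cons]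
        have hss : succSet (a :: a :: t') = succSet (a :: t') := by
          simp [succSet, hfs]
        rw [hss]
        have hne : ¬ (a + 1 = a) := by omega
        simp only [succSet]
        rw [show ((a :: a :: t').zip (a :: a :: t').tail)
              = (a, a) :: ((a :: t').zip (a :: t').tail) from rfl]
        rw [List.countP_cons]
        simpa [hne] using ihv
      · have halt : a < b := lt_of_le_of_ne hab heq
        have haS : a ∉ (b :: t').toFinset := by
          intro h
          have := hble a h
          omega
        have hfs : (a :: b :: t').toFinset = insert a (b :: t').toFinset := by
          simp [List.toFinset_cons]
        have hstep1 : succSet (a :: b :: t')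
            = Finset.filter (fun v => v + 1 ∈ (b :: t').toFinset) (insert a (b :: t').toFinset) := by
          rw [succSet, hfs]
          refine Finset.filter_congr ?_
          intro v hv
          have hav : a ≤ v := by
            rcases Finset.mem_insert.mp hv with h | h
            · omega
            · have := hble v h; omega
          constructor
          · intro h
            rcases Finset.mem_insert.mp h with h | h
            · omega
            · exact h
          · intro h
            exact Finset.mem_insert_of_mem h
        have hmemS : a + 1 ∈ (b :: t').toFinset ↔ a + 1 = b := by
          constructor
          · intro h
            have := hble _ h
            omega
          · intro h
            rw [List.mem_toFinset]
            simp [← h]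
        rw [hstep1, Finset.filter_insert]
        rw [show ((a :: b :: t').zip (a :: b :: t').tail)
              = (a, b) :: ((b :: t').zip (b :: t').tail) from rfl]
        rw [List.countP_cons]
        by_cases h1 : a + 1 = b
        · rw [if_pos (hmemS.mpr h1)]
          have hnotin : a ∉ Finset.filter (fun v => v + 1 ∈ (b :: t').toFinset) (b :: t').toFinset :=
            fun h => haS (Finset.mem_of_mem_filter _ h)
          rw [Finset.card_insert_of_notMem hnotin]
          have hd : (decide (a + 1 = b)) = true := by simp [h1]
          rw [hd]
          push_cast
          rw [ihv]
          simp
        · rw [if_neg (fun h => h1 (hmemS.mp h))]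
          have hd : (decide (a + 1 = b)) = false := by simp [h1]
          rw [hd]
          simpa using ihv

-- B's filtered set has succSet's cardinality.
lemma alt_filter_card (indices : List Int) :
    ((PySem.Set.ofList indices).filter
        (fun v => PySem.Set.contains (PySem.Set.ofList indices) (v + 1))).length
      = (succSet indices).card := by
  set present := PySem.Set.ofList indices with hpres
  have hmem : ∀ x : Int, x ∈ present ↔ x ∈ indices := fun x => PySem.Set.mem_ofList indices x
  have hnd : present.Nodup := PySem.Set.nodup_ofList indices
  have hfin : present.toFinset = indices.toFinset := by
    ext x
    simp [List.mem_toFinset, hmem]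
  have hcongr : present.filter (fun v => PySem.Set.contains present (v + 1))
      = present.filter (fun v => decide (v + 1 ∈ indices.toFinset)) := by
    refine List.filter_congr ?_
    intro v _
    by_cases h : (v + 1) ∈ indices
    · simp [PySem.Set.contains, hmem, List.mem_toFinset, h]
    · simp [PySem.Set.contains, hmem, List.mem_toFinset, h]
  rw [hcongr]
  have hnd2 : (present.filter (fun v => decide (v + 1 ∈ indices.toFinset))).Nodup :=
    hnd.filter _
  rw [← List.toFinset_card_of_nodup hnd2, List.toFinset_filter, hfin]
  simp [succSet]

-- A on a nonempty list computes length - |succSet| (via sorting).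
lemma a_formula (indices : List Int) (h2 : 2 ≤ indices.length) :
    get_hunks_count indices = (indices.length : Int) - (succSet indices).card := by
  unfold get_hunks_count
  rw [if_neg (by omega), if_neg (by omega)]
  show ((PySem.List.sorted indices (fun x => x) false).zip
      (PySem.List.slice (PySem.List.sorted indices (fun x => x) false) (some 1) none)).foldl
      (fun hunks p => if p.1 + 1 ≠ p.2 then hunks + 1 else hunks) 1 = _
  set s := PySem.List.sorted indices (fun x => x) false with hsdef
  have hperm : s.Perm indices := PySem.List.sorted_perm indices (fun x => x) false
  have hpw : s.Pairwise (· ≤ ·) := by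
    simpa using PySem.List.sorted_pairwise indices (fun x : Int => x)
  have hslen : s.length = indices.length := hperm.length_eq
  rw [PySem.List.slice_from_one]
  rw [foldl_hunks]
  have hziplen : (s.zip s.tail).length = s.length - 1 := by
    rw [List.length_zip, List.length_tail]
    omega
  have hcount := countP_not_add (s.zip s.tail) (fun p => decide (p.1 + 1 = p.2))
  have hadj := adj_eq_succSet s hpw
  have hfseq : succSet s = succSet indices := by
    have : s.toFinset = indices.toFinset := by
      ext x
      simp [List.mem_toFinset, hperm.mem_iff]
    simp [succSet, this]
  rw [hfseq] at hadj
  simp only [] at hcount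
  have hnotform : (s.zip s.tail).countP (fun p => decide (p.1 + 1 ≠ p.2))
      = (s.zip s.tail).countP (fun x => !decide (x.1 + 1 = x.2)) := by
    refine List.countP_congr ?_
    intro x _
    by_cases h : x.1 + 1 = x.2 <;> simp [h]
  rw [hnotform]
  omega

-- ===== VERDICT (by name: the statement is the Claim_ definition above) =====
theorem get_hunks_count_spec : Claim_equal_get_hunks_count := by
  intro indices _
  unfold Spec_get_hunks_count
  rcases indices with _ | ⟨a, _ | ⟨b, t'⟩⟩
  · rfl
  · -- length-1 case: A returns 1 directly; B computes 1 - 0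
    have hset : PySem.Set.ofList [a] = [a] := rfl
    simp [get_hunks_count, get_hunks_count_alt, hset, List.filter, PySem.Set.contains]
  · have h2 : 2 ≤ (a :: b :: t').length := by simp
    rw [a_formula _ h2]
    unfold get_hunks_count_alt
    rw [if_neg (by simp)]
    show _ = (((a :: b :: t').length : Int)
      - (((PySem.Set.ofList (a :: b :: t')).filter
          (fun v => PySem.Set.contains (PySem.Set.ofList (a :: b :: t')) (v + 1))).length : Int))
    rw [alt_filter_card]
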